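-- pv_equiv track=rewrite | github.com/matthewdeanmartin/gizyskon | main.py | reconstruct_interpretation_B_all
-- ===== SOURCE A (Python) =====
-- from typing import List, Optional, Tuple
--
-- def digit_sum(n: int) -> int:
--     return sum(int(d) for d in str(n))
--
-- def reconstruct_interpretation_B_all(target_vals: List[int]) -> List[List[int]]:
--     # Backtracking over tail sums with tight bounds.
--     n = len(target_vals)
--     sols = []
--
--     # Precompute feasible single-letter tails for last position
--     last_target = target_vals[-1]
--     last_candidates = [t for t in range(1, 26+1)
--                        if ((digit_sum(t) + 6 - 1) % 26) + 1 == last_target]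
--
--     def backtrack(i: int, T_next: int, acc_letters: List[int]):
--         # i indexes current position from right to left (working backwards).
--         # T_next is T_{i+1}; we need to choose T_i in [T_next+1, T_next+26] with correct f(T_i).
--         if i < 0:
--             sols.append(list(reversed(acc_letters)))  # reverse to normal order
--             return
--         low = T_next + 1
--         high = T_next + 26
--         y = target_vals[i]
--         # filter candidates in [low, high] matching y
--         for Ti in range(low, high+1):
--             if ((digit_sum(Ti) + 6 - 1) % 26) + 1 == y:
--                 xi = Ti - T_next
--                 if 1 <= xi <= 26:
--                     acc_letters.append(xi)
--                     backtrack(i-1, Ti, acc_letters)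
--                     acc_letters.pop()
--
--     # Start from last pos (index n-1): choose T_n from last_candidates and recurse
--     for Tn in last_candidates:
--         backtrack(n-2, Tn, [Tn])  # acc_letters currently has x_n = Tn
--     return sols
-- ===== SOURCE B (Python) =====
-- from typing import List
--
-- def digit_sum(n: int) -> int:
--     return sum(int(d) for d in str(n))
--
-- def reconstruct_interpretation_B_all(target_vals: List[int]) -> List[List[int]]:
--     # Level-wise expansion: each state is the reversed letter list [x_n, ..., x_i];
--     # its sum is the running tail total T_i, so no separate T bookkeeping is needed.
--     last_target = target_vals[-1]
--     states = [[t] for t in range(1, 27)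
--               if ((digit_sum(t) + 6 - 1) % 26) + 1 == last_target]
--     for y in reversed(target_vals[:-1]):
--         states = [acc + [xi]
--                   for acc in states
--                   for xi in range(1, 27)
--                   if ((digit_sum(sum(acc) + xi) + 6 - 1) % 26) + 1 == y]
--     return [list(reversed(s)) for s in states]
-- ===== Notes on version B (the rewrite author's own statement) =====
-- stated objective: simpler
-- what changed: Replaces the recursive backtracking with mutable shared state (sols accumulator, append/pop on acc_letters, per-node tail-sum range scan) by a level-wise comprehension that expands all partial solutions one position at a time, recovering the tail sum as sum(acc) so no T bookkeeping or recursion is needed.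
-- outside the precondition, e.g. on reconstruct_interpretation_B_all([]): A raises IndexError, B raises IndexError
import Mathlib
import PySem

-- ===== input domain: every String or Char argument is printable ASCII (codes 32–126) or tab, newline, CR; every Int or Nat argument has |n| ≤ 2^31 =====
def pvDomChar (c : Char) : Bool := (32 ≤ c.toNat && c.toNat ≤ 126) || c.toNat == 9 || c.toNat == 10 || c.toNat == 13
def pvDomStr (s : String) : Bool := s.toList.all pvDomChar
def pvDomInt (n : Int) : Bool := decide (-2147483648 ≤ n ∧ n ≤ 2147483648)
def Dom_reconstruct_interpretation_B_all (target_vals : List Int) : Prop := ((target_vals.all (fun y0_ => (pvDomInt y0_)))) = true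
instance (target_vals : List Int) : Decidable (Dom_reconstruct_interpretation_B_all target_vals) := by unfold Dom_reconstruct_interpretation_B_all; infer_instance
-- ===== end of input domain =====

-- B replaces the recursive backtracking of A with a level-wise comprehension expansion
-- (same results in the same order); objective: simpler.

-- ===== PORT A =====
-- digit_sum(n) = sum(int(d) for d in str(n)): exact for n ≥ 0 (every char of str(n) is then a
-- digit, so int(d) never raises); both programs only ever call it with n ≥ 1.
def pvDigitSum (n : Int) : Int :=
  ((PySem.Int.toChars n).map (fun d => (PySem.Int.ofChars? [d]).getD 0)).sum

-- ((digit_sum(t) + 6 - 1) % 26) + 1, the cipher value test shared by both programs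
def pvF (t : Int) : Int := PySem.Int.mod (pvDigitSum t + 6 - 1) 26 + 1

-- backtrack(i, T_next, acc_letters); fuel = i + 1 (i < 0 is fuel 0), sols is the fold state;
-- tv[i] is a valid index on every reachable call, so .getD 0 is never used.
def pvBacktrackA (tv : List Int) : Nat → Int → List Int → List (List Int)
  | 0, _, acc => [acc.reverse]
  | k+1, tNext, acc =>
    (PySem.List.pyRange (tNext + 1) (tNext + 26 + 1) 1).foldl
      (fun sols Ti =>
        if pvF Ti == (PySem.List.pyGet? tv (k : Int)).getD 0 then
          if 1 ≤ Ti - tNext ∧ Ti - tNext ≤ 26 then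
            sols ++ pvBacktrackA tv k Ti (acc ++ [Ti - tNext])
          else sols
        else sols) []

def reconstruct_interpretation_B_all (target_vals : List Int) : List (List Int) :=
  let n : Int := target_vals.length
  -- target_vals[-1] raises IndexError on []; Pre_ excludes the empty list
  let last_target := (PySem.List.pyGet? target_vals (-1)).getD 0
  let last_candidates :=
    (PySem.List.pyRange 1 (26 + 1) 1).filter (fun t => pvF t == last_target)
  last_candidates.foldl
    (fun sols Tn => sols ++ pvBacktrackA target_vals (n - 1).toNat Tn [Tn]) []

-- ===== PORT B =====
-- one level of the comprehension: states = [acc+[xi] for acc in states for xi in 1..26 if f(sum(acc)+xi)==y]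
def pvStepB (y : Int) (states : List (List Int)) : List (List Int) :=
  states.flatMap (fun acc =>
    ((PySem.List.pyRange 1 (26 + 1) 1).filter
        (fun xi => pvF (acc.sum + xi) == y)).map (fun xi => acc ++ [xi]))

def reconstruct_interpretation_B_all_alt (target_vals : List Int) : List (List Int) :=
  let last_target := (PySem.List.pyGet? target_vals (-1)).getD 0
  let init := ((PySem.List.pyRange 1 (26 + 1) 1).filter
      (fun t => pvF t == last_target)).map (fun t => [t])
  ((target_vals.dropLast.reverse).foldl (fun states y => pvStepB y states) init).map
    List.reverse

-- ===== PRECONDITION & SPEC =====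
-- A raises IndexError (target_vals[-1]) on the empty list; Pre_ excludes exactly that input.
def Pre_reconstruct_interpretation_B_all (target_vals : List Int) : Prop := target_vals ≠ []
instance (target_vals : List Int) : Decidable (Pre_reconstruct_interpretation_B_all target_vals) := by unfold Pre_reconstruct_interpretation_B_all; infer_instance
def pvWitness_reconstruct_interpretation_B_all : List Int := [7]

def Spec_reconstruct_interpretation_B_all (target_vals : List Int) (out : List (List Int)) : Prop := out = reconstruct_interpretation_B_all_alt target_vals
instance (target_vals : List Int) (out : List (List Int)) : Decidable (Spec_reconstruct_interpretation_B_all target_vals out) := by unfold Spec_reconstruct_interpretation_B_all; infer_instance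

-- ===== CLAIM (what is proved, stated in full; the proofs are below) =====
def Claim_equal_reconstruct_interpretation_B_all : Prop := ∀ (target_vals : List Int), Dom_reconstruct_interpretation_B_all target_vals → Pre_reconstruct_interpretation_B_all target_vals → Spec_reconstruct_interpretation_B_all target_vals (reconstruct_interpretation_B_all target_vals)

-- ===== LEMMAS AND PROOFS =====

-- repeated application of pvStepB, the fold B's port performs
def pvExpand (ys : List Int) (states : List (List Int)) : List (List Int) :=
  ys.foldl (fun st y => pvStepB y st) states

theorem pvStepB_append (y : Int) (S1 S2 : List (List Int)) :
    pvStepB y (S1 ++ S2) = pvStepB y S1 ++ pvStepB y S2 := by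
  simp [pvStepB]

theorem pvExpand_nil (ys : List Int) : pvExpand ys [] = [] := by
  induction ys with
  | nil => rfl
  | cons y ys ih => simpa [pvExpand, pvStepB] using ih

theorem pvExpand_append (ys : List Int) (S1 S2 : List (List Int)) :
    pvExpand ys (S1 ++ S2) = pvExpand ys S1 ++ pvExpand ys S2 := by
  induction ys generalizing S1 S2 with
  | nil => rfl
  | cons y ys ih => simp [pvExpand, pvStepB_append, List.foldl_cons] at *; rw [ih]

theorem pvExpand_map {α : Type} (ys : List Int) (l : List α) (f : α → List Int) :
    pvExpand ys (l.map f) = l.flatMap (fun x => pvExpand ys [f x]) := by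
  induction l with
  | nil => simpa using pvExpand_nil ys
  | cons a l ih =>
      have : (a :: l).map f = [f a] ++ l.map f := by simp
      rw [this, pvExpand_append, ih]; simp

theorem pvFlatMap_filter {α β : Type} (l : List α) (p : α → Bool) (g : α → List β) :
    (l.filter p).flatMap g = l.flatMap (fun x => if p x then g x else []) := by
  induction l with
  | nil => rfl
  | cons a l ih => by_cases h : p a <;> simp [h, ih]

theorem pvRange_shift (T : Int) :
    PySem.List.pyRange (T + 1) (T + 26 + 1) 1 =
      (PySem.List.pyRange 1 (26 + 1) 1).map (fun x => T + x) := by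
  rw [PySem.List.pyRange_one, PySem.List.pyRange_one]
  have h1 : T + 26 + 1 - (T + 1) = (26 : Int) := by ring
  rw [h1]
  simp only [List.map_map]
  apply List.map_congr_left
  intro k _
  simp [Function.comp]
  ring

theorem pvBacktrackA_eq (tv : List Int) :
    ∀ (k : Nat), k ≤ tv.length → ∀ (acc : List Int),
      pvBacktrackA tv k acc.sum acc =
        (pvExpand ((tv.take k).reverse) [acc]).map List.reverse := by
  intro k
  induction k with
  | zero => intro _ acc; simp [pvBacktrackA, pvExpand]
  | succ k ih =>
    intro hk acc
    have hklt : k < tv.length := hk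
    have htake : (tv.take (k+1)).reverse = tv[k] :: (tv.take k).reverse := by
      rw [List.take_add_one]; simp [List.getElem?_eq_getElem hklt]
    have hget : (PySem.List.pyGet? tv (k:Int)).getD 0 = tv[k] := by
      simp [PySem.List.pyGet?_natCast, List.getElem?_eq_getElem hklt]
    have hstep : ∀ S, pvExpand (tv[k] :: (tv.take k).reverse) S
        = pvExpand ((tv.take k).reverse) (pvStepB tv[k] S) := by
      intro S; rfl
    rw [htake, hstep]
    have hsingle : pvStepB tv[k] [acc]
        = ((PySem.List.pyRange 1 (26+1) 1).filter
            (fun xi => pvF (acc.sum + xi) == tv[k])).map (fun xi => acc ++ [xi]) := by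
      simp [pvStepB]
    rw [hsingle, pvExpand_map, List.map_flatMap, pvFlatMap_filter]
    show (PySem.List.pyRange (acc.sum + 1) (acc.sum + 26 + 1) 1).foldl _ [] = _
    rw [pvRange_shift, List.foldl_map]
    have hcongr := PySem.List.foldl_congr_mem'
      (l := PySem.List.pyRange 1 (26+1) 1) (init := ([] : List (List Int)))
      (f := fun sols xi =>
          if pvF (acc.sum + xi) == (PySem.List.pyGet? tv (k:Int)).getD 0 then
            if 1 ≤ acc.sum + xi - acc.sum ∧ acc.sum + xi - acc.sum ≤ 26 then
              sols ++ pvBacktrackA tv k (acc.sum + xi) (acc ++ [acc.sum + xi - acc.sum])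
            else sols
          else sols)
      (g := fun sols xi => sols ++ (if pvF (acc.sum + xi) == tv[k]
          then pvBacktrackA tv k (acc.sum + xi) (acc ++ [xi]) else []))
      (by
        intro xi hxi sols
        have hb := (PySem.List.mem_pyRange_one).1 hxi
        have hsub : acc.sum + xi - acc.sum = xi := by ring
        rw [hget]
        simp only [hsub]
        by_cases hc : pvF (acc.sum + xi) == tv[k]
        · simp only [hc, if_pos]
          rw [if_pos ⟨hb.1, by omega⟩]
        · simp [hc])
    rw [hcongr]
    rw [PySem.List.foldl_append_eq_flatMap]
    simp only [List.nil_append]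
    apply List.flatMap_congr
    intro xi hxi
    by_cases hc : pvF (acc.sum + xi) == tv[k]
    · simp only [hc, if_pos]
      have hsum : (acc ++ [xi]).sum = acc.sum + xi := by simp
      have hih := ih (Nat.le_of_lt hklt) (acc ++ [xi])
      rw [hsum] at hih
      rw [hih]
    · simp [hc]

-- ===== VERDICT (by name: the statement is the Claim_ definition above) =====
theorem reconstruct_interpretation_B_all_spec : Claim_equal_reconstruct_interpretation_B_all := by
  intro tv _ hpre
  unfold Spec_reconstruct_interpretation_B_all
  have hlen : 1 ≤ tv.length := List.length_pos_iff.mpr hpre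
  have hk : ((tv.length : Int) - 1).toNat = tv.length - 1 := by omega
  show (((PySem.List.pyRange 1 (26+1) 1).filter
      (fun t => pvF t == (PySem.List.pyGet? tv (-1)).getD 0)).foldl
      (fun sols Tn => sols ++ pvBacktrackA tv (((tv.length : Int)) - 1).toNat Tn [Tn]) [])
    = ((tv.dropLast.reverse).foldl (fun states y => pvStepB y states)
        (((PySem.List.pyRange 1 (26+1) 1).filter
          (fun t => pvF t == (PySem.List.pyGet? tv (-1)).getD 0)).map (fun t => [t]))).map
        List.reverse
  set cands := (PySem.List.pyRange 1 (26+1) 1).filter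
      (fun t => pvF t == (PySem.List.pyGet? tv (-1)).getD 0) with hcands
  have hrhs : ((tv.dropLast.reverse).foldl (fun states y => pvStepB y states)
        (cands.map (fun t => [t]))).map List.reverse
      = cands.flatMap (fun t =>
          (pvExpand ((tv.take (tv.length - 1)).reverse) [[t]]).map List.reverse) := by
    have : (tv.dropLast.reverse).foldl (fun states y => pvStepB y states)
        (cands.map (fun t => [t]))
        = pvExpand ((tv.take (tv.length - 1)).reverse) (cands.map (fun t => [t])) := by
      rw [← List.dropLast_eq_take]; rfl
    rw [this, pvExpand_map, List.map_flatMap]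
  rw [hrhs, PySem.List.foldl_append_eq_flatMap]
  simp only [List.nil_append]
  apply List.flatMap_congr
  intro Tn _
  have hsum : ([Tn] : List Int).sum = Tn := by simp
  have h := pvBacktrackA_eq tv (tv.length - 1) (Nat.sub_le _ _) [Tn]
  rw [hsum] at h
  rw [hk, h]
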